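-- pv_equiv track=rewrite | github.com/MANY-35/OneQuestionADay | programmers/스킬체크/596518/solution.py | solution
-- ===== SOURCE A (Python) =====
-- from collections import deque
--
-- def solution(board, moves):
--     answer = 0
--     stacks = [deque() for _ in range(len(board[0]))]
--     for i in range(len(board)):
--         for j in range(len(board[0])):
--             if board[i][j] != 0:
--                 stacks[j].append(board[i][j])
--
--
--     que = [0]
--     for move in moves:
--         if len(stacks[move - 1]) == 0:
--             continue
--         n = stacks[move - 1].popleft()
--         if n == que[-1]:
--             answer += 2
--             que.pop()
--         else:
--             que.append(n)
--     return answer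
-- ===== SOURCE B (Python) =====
-- def solution(board, moves):
--     # stage 1: transpose the board and keep only the dolls (nonzero cells), top first
--     cols = [[v for v in col if v != 0] for col in zip(*board)]
--     # stage 2: replay the moves against per-column read cursors, collecting the picked dolls
--     taken = [0] * len(cols)
--     picked = []
--     for m in moves:
--         k = taken[m - 1]
--         col = cols[m - 1]
--         if k < len(col):
--             picked.append(col[k])
--             taken[m - 1] = k + 1
--     # stage 3: pair-cancel the picked sequence; the answer is how many dolls vanished
--     stack = []
--     for n in picked:
--         if stack and stack[-1] == n:
--             stack.pop()
--         else:
--             stack.append(n)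
--     return len(picked) - len(stack)
-- ===== Notes on version B (the rewrite author's own statement) =====
-- stated objective: alternative
-- what changed: B replaces A's fused mutate-as-you-go simulation by three staged passes: a zip-based transpose-and-filter, a cursor-indexed replay of the moves that only collects the picked sequence, and a separate pair-cancellation whose answer is derived from length arithmetic (len(picked) - len(stack)) instead of A's answer += 2 counter and [0]-sentinel basket.
import Mathlib
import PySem

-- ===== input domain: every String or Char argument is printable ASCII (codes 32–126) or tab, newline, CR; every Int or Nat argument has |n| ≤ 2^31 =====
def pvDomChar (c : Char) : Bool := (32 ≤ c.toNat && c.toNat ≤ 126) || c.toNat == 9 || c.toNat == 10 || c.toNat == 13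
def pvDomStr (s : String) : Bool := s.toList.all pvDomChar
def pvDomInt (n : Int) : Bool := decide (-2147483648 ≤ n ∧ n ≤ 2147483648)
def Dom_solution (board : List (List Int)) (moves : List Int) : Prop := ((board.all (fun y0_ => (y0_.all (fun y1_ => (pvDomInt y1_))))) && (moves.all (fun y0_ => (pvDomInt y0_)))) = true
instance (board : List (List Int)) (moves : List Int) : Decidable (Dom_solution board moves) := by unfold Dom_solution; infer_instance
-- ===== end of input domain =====

-- B restructures A's fused simulation into three staged passes (zip-transpose/filter,
-- cursor-indexed replay collecting the picked dolls, separate pair-cancellation) and derives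
-- the answer from length arithmetic instead of A's counter and [0]-sentinel basket.
-- Equivalence is about return values only (neither program mutates its arguments).

-- ===== PORT A =====
-- one inner-loop step: 'if board[i][j] != 0: stacks[j].append(board[i][j])'
def rowStep (row : List Int) (st : List (List Int)) (j : Nat) : List (List Int) :=
  if row.getD j 0 ≠ 0 then st.set j (st.getD j [] ++ [row.getD j 0]) else st

-- the double build loop over i in range(len(board)), j in range(W); cell reads are getD,
-- exact under Pre_ (every row has length ≥ W)
def buildStacks (board : List (List Int)) (W : Nat) : List (List Int) :=
  board.foldl (fun st row => (List.range W).foldl (rowStep row) st) (List.replicate W ([] : List Int))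

-- one iteration of A's moves loop; state = (answer, stacks, que)
def stepA (s : Int × List (List Int) × List Int) (move : Int) :
    Int × List (List Int) × List Int :=
  match PySem.List.pyGet? s.2.1 (move - 1) with
  | none => s          -- IndexError in Python; excluded by Pre_
  | some stk =>
    match stk with
    | [] => s          -- empty column: continue
    | n :: rest =>     -- popleft
      let st2 := PySem.List.pySetD s.2.1 (move - 1) rest
      if n = s.2.2.getLastD 0 then (s.1 + 2, st2, s.2.2.dropLast)   -- que[-1]; que is never empty (starts [0], 0 is never popped)
      else (s.1, st2, s.2.2 ++ [n])

def solution (board : List (List Int)) (moves : List Int) : Int :=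
  let W := (board.headD []).length   -- len(board[0]); board = [] raises in Python, excluded by Pre_
  (moves.foldl stepA (0, buildStacks board W, [0])).1

-- ===== PORT B =====
-- zip(*board): columns truncated to the shortest row, exact as in Python
def colsOf (board : List (List Int)) : List (List Int) :=
  match board with
  | [] => []
  | r :: rs =>
    let m := rs.foldl (fun a row => Nat.min a row.length) r.length
    (List.range m).map (fun j => (r :: rs).map (fun row => row.getD j 0))

-- one iteration of B's replay loop; state = (taken, picked)
def stepPick (cols : List (List Int)) (s : List Nat × List Int) (m : Int) : List Nat × List Int :=
  match PySem.List.pyGet? s.1 (m - 1), PySem.List.pyGet? cols (m - 1) with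
  | some k, some col =>
    if k < col.length then
      (PySem.List.pySetD s.1 (m - 1) (k + 1), s.2 ++ [col.getD k 0])  -- col[k]: in range by the guard
    else s
  | _, _ => s          -- taken[m-1]/cols[m-1] IndexError in Python; excluded by Pre_

-- one iteration of B's cancellation loop: 'if stack and stack[-1] == n'
def cancelStep (st : List Int) (n : Int) : List Int :=
  if st ≠ [] ∧ st.getLastD 0 = n then st.dropLast else st ++ [n]

def solution_alt (board : List (List Int)) (moves : List Int) : Int :=
  let cols := (colsOf board).map (fun col => col.filter (fun v => decide (v ≠ 0)))
  let picked := (moves.foldl (stepPick cols) (List.replicate cols.length 0, [])).2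
  let stack := picked.foldl cancelStep []
  (picked.length : Int) - (stack.length : Int)

-- ===== PRECONDITION & SPEC =====
-- Pre_ excludes exactly the inputs where A raises: an empty board (board[0] IndexError), a row
-- shorter than the first row (read while building the stacks), or a move m outside [1-W, W]
-- (stacks[m-1] IndexError, W = len(board[0])).
def Pre_solution (board : List (List Int)) (moves : List Int) : Prop :=
  board ≠ [] ∧ (∀ row ∈ board, (board.headD []).length ≤ row.length) ∧
    (∀ m ∈ moves, 1 - ((board.headD []).length : Int) ≤ m ∧ m ≤ ((board.headD []).length : Int))
instance (board : List (List Int)) (moves : List Int) : Decidable (Pre_solution board moves) := by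
  unfold Pre_solution; infer_instance

def pvWitness_solution : List (List Int) × List Int :=
  ([[0, 0, 3], [1, 2, 3], [1, 2, 0]], [1, 3, 3, 2, 1, 2])

def Spec_solution (board : List (List Int)) (moves : List Int) (out : Int) : Prop := out = solution_alt board moves
instance (board : List (List Int)) (moves : List Int) (out : Int) : Decidable (Spec_solution board moves out) := by unfold Spec_solution; infer_instance

-- ===== CLAIM (what is proved, stated in full; the proofs are below) =====
def Claim_equal_solution : Prop := ∀ (board : List (List Int)) (moves : List Int), Dom_solution board moves → Pre_solution board moves → Spec_solution board moves (solution board moves)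

-- ===== LEMMAS AND PROOFS =====

-- column c of the board, as both programs read cells (rows shorter than c default to 0)
def col (board : List (List Int)) (c : Nat) : List Int :=
  board.map (fun row => row.getD c 0)

theorem getD_set_self {α : Type} (l : List α) (j : Nat) (x d : α) (h : j < l.length) :
    (l.set j x).getD j d = x := by
  simp [List.getD, h]

theorem getD_set_of_ne {α : Type} (l : List α) (j c : Nat) (x d : α) (h : c ≠ j) :
    (l.set j x).getD c d = l.getD c d := by
  simp [List.getD, Ne.symm h]

theorem length_foldl_rowStep (row : List Int) (js : List Nat) (st : List (List Int)) :
    (js.foldl (rowStep row) st).length = st.length := by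
  induction js generalizing st with
  | nil => rfl
  | cons j js ih =>
    rw [List.foldl_cons, ih]
    unfold rowStep; split <;> simp

theorem inner_getD (row : List Int) (js : List Nat) :
    ∀ st : List (List Int), js.Nodup → (∀ j ∈ js, j < st.length) → ∀ c : Nat,
      (js.foldl (rowStep row) st).getD c [] =
        if c ∈ js ∧ row.getD c 0 ≠ 0 then st.getD c [] ++ [row.getD c 0] else st.getD c [] := by
  induction js with
  | nil => intro st _ _ c; simp
  | cons j js ih =>
    intro st hnd hlt c
    obtain ⟨hj_nin, hnd'⟩ := List.nodup_cons.mp hnd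
    have hjlt : j < st.length := hlt j (by simp)
    have hlen : (rowStep row st j).length = st.length := by
      unfold rowStep; split <;> simp
    rw [List.foldl_cons,
        ih (rowStep row st j) hnd' (by intro x hx; rw [hlen]; exact hlt x (List.mem_cons_of_mem _ hx)) c]
    by_cases hc : c = j
    · subst hc
      rw [if_neg (by rintro ⟨h1, -⟩; exact hj_nin h1)]
      by_cases hv : row.getD c 0 = 0
      · have h1 : rowStep row st c = st := by
          unfold rowStep; rw [if_neg (not_not_intro hv)]
        rw [h1, if_neg (by rintro ⟨-, h2⟩; exact h2 hv)]
      · have h1 : (rowStep row st c).getD c [] = st.getD c [] ++ [row.getD c 0] := by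
          unfold rowStep; rw [if_pos hv, getD_set_self _ _ _ _ hjlt]
        rw [h1, if_pos ⟨by simp, hv⟩]
    · have harm : (rowStep row st j).getD c [] = st.getD c [] := by
        unfold rowStep; split
        · exact getD_set_of_ne _ _ _ _ _ hc
        · rfl
      rw [harm]
      simp [hc]

theorem length_buildStacks_aux (rows : List (List Int)) (W : Nat) :
    ∀ st : List (List Int),
    (rows.foldl (fun st row => (List.range W).foldl (rowStep row) st) st).length = st.length := by
  induction rows with
  | nil => intro st; rfl
  | cons row rows ih =>
    intro st
    rw [List.foldl_cons, ih, length_foldl_rowStep]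

theorem build_getD_aux (rows : List (List Int)) (W c : Nat) (hc : c < W) :
    ∀ st : List (List Int), st.length = W →
    (rows.foldl (fun st row => (List.range W).foldl (rowStep row) st) st).getD c []
      = st.getD c [] ++ (col rows c).filter (fun v => decide (v ≠ 0)) := by
  induction rows with
  | nil => intro st _; simp [col]
  | cons row rows ih =>
    intro st hst
    have hlen : ((List.range W).foldl (rowStep row) st).length = W := by
      rw [length_foldl_rowStep, hst]
    rw [List.foldl_cons, ih _ hlen,
        inner_getD row (List.range W) st (List.nodup_range)
          (by intro j hj; rw [hst]; exact List.mem_range.mp hj) c]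
    have hcol : col (row :: rows) c = row.getD c 0 :: col rows c := rfl
    rw [hcol, List.filter_cons]
    by_cases hv : row.getD c 0 = 0
    · rw [if_neg (fun h => h.2 hv), if_neg (by rw [hv]; decide)]
    · rw [if_pos ⟨List.mem_range.mpr hc, hv⟩, if_pos (decide_eq_true hv), List.append_assoc]
      rfl

theorem buildStacks_length (board : List (List Int)) (W : Nat) :
    (buildStacks board W).length = W := by
  unfold buildStacks
  rw [length_buildStacks_aux]; simp

theorem buildStacks_getD (board : List (List Int)) (W c : Nat) (hc : c < W) :
    (buildStacks board W).getD c [] = (col board c).filter (fun v => decide (v ≠ 0)) := by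
  unfold buildStacks
  rw [build_getD_aux board W c hc _ (by simp)]
  simp

-- Python index normalisation on the lists of length W (stacks / taken / cols)
theorem pySetD_neg {α : Type} (xs : List α) (k : Nat) (v : α) (h0 : 0 < k) (hk : k ≤ xs.length) :
    PySem.List.pySetD xs (-(k:Int)) v = xs.set (xs.length - k) v := by
  simp [PySem.List.pySetD, PySem.List.pySet?, PySem.List.pyIdx?, h0.ne', hk]

theorem pyget_neg {α : Type} (xs : List α) (k : Nat) (d : α) (h0 : 0 < k) (hk : k ≤ xs.length) :
    PySem.List.pyGet? xs (-(k:Int)) = some (xs.getD (xs.length - k) d) := by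
  rw [PySem.List.pyGet?_neg_natCast (xs := xs) (k := k) h0 hk,
      List.getElem?_eq_getElem (by omega), List.getD_eq_getElem _ _ (by omega)]

theorem norm_get {α : Type} (xs : List α) (d : α) (i : Int)
    (h0 : -(xs.length : Int) ≤ i) (h1 : i < (xs.length : Int)) :
    PySem.List.pyGet? xs i = some (xs.getD (if 0 ≤ i then i.toNat else (i + xs.length).toNat) d) := by
  by_cases hp : 0 ≤ i
  · rw [if_pos hp, PySem.List.pyGet?_of_nonneg xs hp, List.getElem?_eq_getElem (by omega),
        List.getD_eq_getElem _ _ (by omega)]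
  · rw [if_neg hp]
    have hi : i = -(((-i).toNat : Nat) : Int) := by omega
    rw [hi, pyget_neg xs (-i).toNat d (by omega) (by omega)]
    have hidx : xs.length - (-i).toNat = (i + (xs.length : Int)).toNat := by omega
    rw [hidx, ← hi]

theorem norm_set {α : Type} (xs : List α) (v : α) (i : Int)
    (h0 : -(xs.length : Int) ≤ i) (_h1 : i < (xs.length : Int)) :
    PySem.List.pySetD xs i v = xs.set (if 0 ≤ i then i.toNat else (i + xs.length).toNat) v := by
  by_cases hp : 0 ≤ i
  · rw [if_pos hp, PySem.List.pySetD_of_nonneg xs v hp]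
  · rw [if_neg hp]
    have hi : i = -(((-i).toNat : Nat) : Int) := by omega
    rw [hi, pySetD_neg xs (-i).toNat v (by omega) (by omega)]
    have hidx : xs.length - (-i).toNat = (i + (xs.length : Int)).toNat := by omega
    rw [hidx, ← hi]

-- zip(*board) under Pre_: min row length = length of the first row, so the columns are col board j
theorem foldl_min_const (rs : List (List Int)) (a : Nat) (h : ∀ row ∈ rs, a ≤ row.length) :
    rs.foldl (fun a row => Nat.min a row.length) a = a := by
  induction rs with
  | nil => rfl
  | cons r rs ih =>
    have hmin : a.min r.length = a := Nat.min_eq_left (h r (by simp))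
    rw [List.foldl_cons, hmin]
    exact ih (fun row hr => h row (List.mem_cons_of_mem _ hr))

theorem colsOf_pre (board : List (List Int)) (hne : board ≠ [])
    (hlen : ∀ row ∈ board, (board.headD []).length ≤ row.length) :
    colsOf board = (List.range (board.headD []).length).map (col board) := by
  obtain ⟨r, rs, rfl⟩ := List.exists_cons_of_ne_nil hne
  have hcons : colsOf (r :: rs) =
      (List.range (rs.foldl (fun a row => Nat.min a row.length) r.length)).map
        (fun j => (r :: rs).map (fun row => row.getD j 0)) := rfl
  rw [hcons, foldl_min_const rs r.length
    (fun row hr => hlen row (List.mem_cons_of_mem _ hr))]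
  rfl

-- the filtered columns B works with
def colsF (board : List (List Int)) : List (List Int) :=
  (List.range (board.headD []).length).map
    (fun j => (col board j).filter (fun v => decide (v ≠ 0)))

theorem colsF_length (board : List (List Int)) :
    (colsF board).length = (board.headD []).length := by
  simp [colsF]

theorem colsF_getD (board : List (List Int)) (c : Nat) (hc : c < (board.headD []).length) :
    (colsF board).getD c [] = (col board c).filter (fun v => decide (v ≠ 0)) := by
  unfold colsF
  rw [List.getD_eq_getElem _ _ (by simpa using hc)]
  simp

-- the sentinel comparison n == que[-1] (que = 0 :: stack) matches exactly B's 'stack and stack[-1] == n'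
theorem last_cond (S : List Int) (n : Int) (hn : n ≠ 0) :
    (n = (0 :: S).getLastD 0) ↔ (S ≠ [] ∧ S.getLastD 0 = n) := by
  cases S with
  | nil => simp [hn]
  | cons a as =>
    rw [List.getLastD_cons]
    constructor
    · intro h; exact ⟨by simp, h.symm⟩
    · intro h; exact h.2.symm

-- A's que relates to B's cancellation stack: que = 0 :: stack, and a picked doll is never 0
theorem que_step (st : List Int) (n : Int) (hn : n ≠ 0) :
    (if n = (0 :: st).getLastD 0 then (0 :: st).dropLast else (0 :: st) ++ [n])
      = 0 :: cancelStep st n := by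
  unfold cancelStep
  cases st with
  | nil => simp [hn]
  | cons a as =>
    by_cases h : (a :: as).getLastD 0 = n
    · rw [if_pos (by simpa using h.symm), if_pos ⟨by simp, h⟩]
      rfl
    · rw [if_neg (by simpa using fun he => h he.symm), if_neg (by rintro ⟨-, h2⟩; exact h h2)]
      rfl

theorem cancel_length (st : List Int) (n : Int) :
    ((cancelStep st n).length : Int) = if st ≠ [] ∧ st.getLastD 0 = n
      then (st.length : Int) - 1 else (st.length : Int) + 1 := by
  unfold cancelStep
  split
  · rename_i h
    cases st with
    | nil => exact absurd rfl h.1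
    | cons a as => simp [List.length_dropLast]
  · simp

-- the loop invariant tying A's state to B's replay state
def StRel (board : List (List Int)) (W : Nat)
    (sA : Int × List (List Int) × List Int) (sB : List Nat × List Int) : Prop :=
  sA.2.2 = 0 :: sB.2.foldl cancelStep [] ∧
  sA.1 = (sB.2.length : Int) - ((sB.2.foldl cancelStep []).length : Int) ∧
  sA.2.1.length = W ∧ sB.1.length = W ∧
  ∀ c : Nat, c < W →
    sA.2.1.getD c [] = ((colsF board).getD c []).drop (sB.1.getD c 0)

theorem step_rel (board : List (List Int)) (W : Nat) (hWb : W = (board.headD []).length)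
    (m : Int) (hm : 1 - (W : Int) ≤ m ∧ m ≤ (W : Int))
    (sA : Int × List (List Int) × List Int) (sB : List Nat × List Int)
    (h : StRel board W sA sB) :
    StRel board W (stepA sA m) (stepPick (colsF board) sB m) := by
  obtain ⟨hque, hans, hlA, hlB, hcols⟩ := h
  have hW : 0 < W := by omega
  set c : Nat := if 0 ≤ m - 1 then (m - 1).toNat else (m - 1 + (W : Int)).toNat with hc
  have hcW : c < W := by rw [hc]; split <;> omega
  have hb0 : -((W : Int)) ≤ m - 1 := by omega
  have hb1 : m - 1 < (W : Int) := by omega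
  have hlC : (colsF board).length = W := by rw [colsF_length, hWb]
  have hget : PySem.List.pyGet? sA.2.1 (m - 1) = some (sA.2.1.getD c []) := by
    rw [norm_get sA.2.1 [] (m - 1) (by rw [hlA]; exact hb0) (by rw [hlA]; exact hb1), hlA, ← hc]
  have hgetB : PySem.List.pyGet? sB.1 (m - 1) = some (sB.1.getD c 0) := by
    rw [norm_get sB.1 0 (m - 1) (by rw [hlB]; exact hb0) (by rw [hlB]; exact hb1), hlB, ← hc]
  have hgetC : PySem.List.pyGet? (colsF board) (m - 1) = some ((colsF board).getD c []) := by
    rw [norm_get (colsF board) [] (m - 1) (by rw [hlC]; exact hb0) (by rw [hlC]; exact hb1), hlC, ← hc]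
  have hset : ∀ v : List Int, PySem.List.pySetD sA.2.1 (m - 1) v = sA.2.1.set c v := by
    intro v
    rw [norm_set sA.2.1 v (m - 1) (by rw [hlA]; exact hb0) (by rw [hlA]; exact hb1), hlA, ← hc]
  have hsetB : ∀ v : Nat, PySem.List.pySetD sB.1 (m - 1) v = sB.1.set c v := by
    intro v
    rw [norm_set sB.1 v (m - 1) (by rw [hlB]; exact hb0) (by rw [hlB]; exact hb1), hlB, ← hc]
  have hcB : c < sB.1.length := by rw [hlB]; exact hcW
  have hcA : c < sA.2.1.length := by rw [hlA]; exact hcW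
  set k := sB.1.getD c 0 with hk
  set colc := (colsF board).getD c [] with hcolc
  have hstk : sA.2.1.getD c [] = colc.drop k := hcols c hcW
  by_cases hkl : k < colc.length
  · -- B picks colc[k]; A pops the same doll from its stack (= drop k colc)
    have hdrop : colc.drop k = colc[k] :: colc.drop (k + 1) :=
      List.drop_eq_getElem_cons hkl
    have hn0 : colc[k] ≠ 0 := by
      have hmem : colc[k] ∈ (col board c).filter (fun v => decide (v ≠ 0)) := by
        rw [← colsF_getD board c (by omega), ← hcolc]
        exact List.getElem_mem hkl
      simpa using (List.mem_filter.mp hmem).2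
    have hstepA : stepA sA m =
        (if colc[k] = sA.2.2.getLastD 0
         then (sA.1 + 2, sA.2.1.set c (colc.drop (k + 1)), sA.2.2.dropLast)
         else (sA.1, sA.2.1.set c (colc.drop (k + 1)), sA.2.2 ++ [colc[k]])) := by
      unfold stepA
      rw [hget, hstk, hdrop]
      simp only [hset]
    have hstepB : stepPick (colsF board) sB m =
        (sB.1.set c (k + 1), sB.2 ++ [colc[k]]) := by
      unfold stepPick
      rw [hgetB, hgetC]
      simp only [if_pos hkl, hsetB, List.getD_eq_getElem colc 0 hkl]
    have hScs := que_step (sB.2.foldl cancelStep []) colc[k] hn0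
    have hnewque : stepA sA m =
        (sA.1 + (if (sB.2.foldl cancelStep []) ≠ [] ∧
            (sB.2.foldl cancelStep []).getLastD 0 = colc[k] then 2 else 0),
          sA.2.1.set c (colc.drop (k + 1)),
          0 :: cancelStep (sB.2.foldl cancelStep []) colc[k]) := by
      rw [hstepA, hque, ← hScs]
      by_cases hA : colc[k] = (0 :: sB.2.foldl cancelStep []).getLastD 0
      · rw [if_pos hA, if_pos ((last_cond _ _ hn0).mp hA), if_pos hA]
      · rw [if_neg hA, if_neg (fun hP => hA ((last_cond _ _ hn0).mpr hP)), if_neg hA]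
        simp
    rw [hnewque, hstepB]
    refine ⟨?_, ?_, by simpa using hlA, by simpa using hlB, ?_⟩
    · simp [List.foldl_append]
    · simp only [List.foldl_append, List.foldl_cons, List.foldl_nil, List.length_append,
        List.length_cons, List.length_nil, cancel_length, hans]
      split <;> push_cast <;> ring
    · intro c' hc'
      by_cases hcc : c' = c
      · subst hcc
        rw [getD_set_self _ _ _ _ hcA, getD_set_self _ _ _ _ hcB, ← hcolc]
      · rw [getD_set_of_ne _ _ _ _ _ hcc, getD_set_of_ne _ _ _ _ _ hcc]
        exact hcols c' hc'
  · -- exhausted column: A's stack is empty, B's guard fails; both states unchanged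
    have hempty : sA.2.1.getD c [] = [] := by
      rw [hstk, List.drop_eq_nil_of_le (by omega)]
    have hstepA : stepA sA m = sA := by
      unfold stepA; rw [hget, hempty]
    have hstepB : stepPick (colsF board) sB m = sB := by
      unfold stepPick
      rw [hgetB, hgetC]
      simp only [if_neg hkl]
    rw [hstepA, hstepB]
    exact ⟨hque, hans, hlA, hlB, hcols⟩

theorem loop_rel (board : List (List Int)) (W : Nat) (hWb : W = (board.headD []).length)
    (moves : List Int) (hmv : ∀ m ∈ moves, 1 - (W : Int) ≤ m ∧ m ≤ (W : Int)) :
    ∀ sA sB, StRel board W sA sB →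
      StRel board W (moves.foldl stepA sA) (moves.foldl (stepPick (colsF board)) sB) := by
  induction moves with
  | nil => intro sA sB h; exact h
  | cons m moves ih =>
    intro sA sB h
    rw [List.foldl_cons, List.foldl_cons]
    exact ih (fun x hx => hmv x (List.mem_cons_of_mem _ hx)) _ _
      (step_rel board W hWb m (hmv m (by simp)) sA sB h)

-- under Pre_, B's cols list is exactly colsF board
theorem alt_eq (board : List (List Int)) (moves : List Int) (hne : board ≠ [])
    (hlen : ∀ row ∈ board, (board.headD []).length ≤ row.length) :
    solution_alt board moves =
      (let picked := (moves.foldl (stepPick (colsF board))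
          (List.replicate (colsF board).length 0, [])).2
       (picked.length : Int) - ((picked.foldl cancelStep []).length : Int)) := by
  unfold solution_alt
  have : (colsOf board).map (fun col => col.filter (fun v => decide (v ≠ 0))) = colsF board := by
    rw [colsOf_pre board hne hlen]
    unfold colsF
    rw [List.map_map]
    rfl
  rw [this]

-- ===== VERDICT (by name: the statement is the Claim_ definition above) =====
theorem solution_spec : Claim_equal_solution := by
  intro board moves _ hpre
  obtain ⟨hne, hlen, hmv⟩ := hpre
  unfold Spec_solution
  set W := (board.headD []).length with hWb
  have hrel := loop_rel board W hWb moves hmv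
    (0, buildStacks board W, [0])
    (List.replicate (colsF board).length 0, [])
    ⟨rfl, rfl, buildStacks_length _ _, by simp only [List.length_replicate]; rw [colsF_length, hWb], by
      intro c hc
      have h0 : (List.replicate (colsF board).length (0 : Nat)).getD c 0 = 0 := by
        simp [List.getD]
      rw [h0, List.drop_zero, buildStacks_getD _ _ _ hc, colsF_getD board c hc]⟩
  rw [alt_eq board moves hne hlen]
  have := hrel.2.1
  unfold solution
  rw [← hWb]
  exact this
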